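-- pv_equiv track=rewrite | github.com/jeanbellynck/Veering | veering_july_13/general_graph_map.py | pullTight
-- ===== SOURCE A (Python) =====
-- def pullTight(path=None):
--     """ returns a tightened copy of a path. """
--     path = path[:]
--     i = 0
--     while i < len(path)-1 and i >= 0:
--         if path[i] == -path[i+1]:
--             del path[i:i+2]
--             i -= 1
--             i = max(0, i)
--         else:
--             i += 1
--     return path
-- ===== SOURCE B (Python) =====
-- def pullTight(path=None):
--     """ returns a tightened copy of a path: single-pass stack free reduction. """
--     stack = []
--     for x in path:
--         if stack and stack[-1] == -x:
--             stack.pop()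
--         else:
--             stack.append(x)
--     return stack
-- ===== Notes on version B (the rewrite author's own statement) =====
-- stated objective: faster
-- what changed: replaces the index-backtracking while loop with in-place slice deletion by a single forward pass that pushes each element on a stack and pops when it cancels the top
import Mathlib
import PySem

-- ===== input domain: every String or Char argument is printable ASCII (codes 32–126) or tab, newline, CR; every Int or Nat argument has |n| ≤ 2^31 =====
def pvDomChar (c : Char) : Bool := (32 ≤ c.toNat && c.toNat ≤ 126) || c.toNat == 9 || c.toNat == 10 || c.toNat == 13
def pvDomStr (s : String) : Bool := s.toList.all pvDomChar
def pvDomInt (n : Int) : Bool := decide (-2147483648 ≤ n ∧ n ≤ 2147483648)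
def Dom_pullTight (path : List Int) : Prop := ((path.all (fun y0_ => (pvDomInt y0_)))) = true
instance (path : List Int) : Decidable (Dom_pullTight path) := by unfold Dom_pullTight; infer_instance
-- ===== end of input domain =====

-- B replaces A's index-backtracking while loop (quadratic slice deletions) by a
-- single-pass stack free reduction (objective: faster, asymptotic).


-- ===== PORT A =====
-- A's while loop: i is kept as a Nat (Python keeps it ≥ 0 via `i = max(0, i)`;
-- Nat subtraction `i - 1` is exactly `max(0, i-1)`).  `del path[i:i+2]` is
-- `take i ++ drop (i+2)`; both indexed reads are in range when i+1 < len.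
def pullTightLoop (path : List Int) (i : Nat) : List Int :=
  if h : i + 1 < path.length then
    if path.getD i 0 = -(path.getD (i + 1) 0) then
      pullTightLoop (List.take i path ++ List.drop (i + 2) path) (i - 1)
    else
      pullTightLoop path (i + 1)
  else path
termination_by 2 * path.length - i
decreasing_by
  · simp only [List.length_append, List.length_take, List.length_drop]; omega
  · omega

def pullTight (path : List Int) : List Int := pullTightLoop path 0

-- ===== PORT B =====
def pullTightGo (stack : List Int) : List Int → List Int
  | [] => stack.reverse
  | x :: xs =>
    match stack with
    | t :: rest => if t = -x then pullTightGo rest xs else pullTightGo (x :: t :: rest) xs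
    | [] => pullTightGo [x] xs

def pullTight_alt (path : List Int) : List Int := pullTightGo [] path

-- ===== PRECONDITION & SPEC =====
def Spec_pullTight (path : List Int) (out : List Int) : Prop := out = pullTight_alt path
instance (path : List Int) (out : List Int) : Decidable (Spec_pullTight path out) := by unfold Spec_pullTight; infer_instance

-- ===== CLAIM (what is proved, stated in full; the proofs are below) =====
def Claim_equal_pullTight : Prop := ∀ (path : List Int), Dom_pullTight path → Spec_pullTight path (pullTight path)

-- ===== LEMMAS AND PROOFS =====

-- Simulation: A's loop at state (s.reverse ++ rest, s.length - 1) computes what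
-- B's stack pass computes from state (s, rest).  Strong induction on rest.
theorem pullTightLoop_eq_go (rest : List Int) :
    ∀ (s : List Int), pullTightLoop (s.reverse ++ rest) (s.length - 1) = pullTightGo s rest := by
  induction rest with
  | nil =>
    intro s
    match s with
    | [] => simp [pullTightLoop, pullTightGo]
    | t :: s' =>
      rw [pullTightLoop, pullTightGo]
      simp
  | cons x rest' ih =>
    intro s
    match s with
    | [] =>
      have h1 : (([] : List Int).reverse ++ x :: rest') = ([x].reverse ++ rest') := by simp
      have h2 : (([] : List Int).length - 1) = ([x].length - 1) := by simp
      rw [h1, h2, ih [x]]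
      rfl
    | t :: s' =>
      rw [pullTightLoop]
      have hlen : (t :: s').length - 1 + 1 < ((t :: s').reverse ++ x :: rest').length := by
        simp
      rw [dif_pos hlen]
      have hrev : (t :: s').reverse = s'.reverse ++ [t] := by simp
      have hi : (t :: s').length - 1 = s'.length := by simp
      have hget1 : ((t :: s').reverse ++ x :: rest').getD ((t :: s').length - 1) 0 = t := by
        rw [hi, hrev]
        rw [List.getD_append _ _ _ _ (by simp)]
        rw [List.getD_append_right _ _ _ _ (by simp)]
        simp
      have hget2 : ((t :: s').reverse ++ x :: rest').getD ((t :: s').length - 1 + 1) 0 = x := by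
        rw [hi, List.getD_append_right _ _ _ _ (by simp)]
        simp
      rw [hget1, hget2, pullTightGo]
      by_cases hc : t = -x
      · rw [if_pos hc, if_pos hc]
        have htake : List.take ((t :: s').length - 1) ((t :: s').reverse ++ x :: rest')
            = s'.reverse := by
          rw [hi, hrev, List.append_assoc, List.take_left' (by simp)]
        have hdrop : List.drop ((t :: s').length - 1 + 2) ((t :: s').reverse ++ x :: rest')
            = rest' := by
          rw [hi, hrev]
          have : s'.reverse ++ [t] ++ x :: rest' = (s'.reverse ++ [t] ++ [x]) ++ rest' := by
            simp
          rw [this, List.drop_left' (by simp)]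
        rw [htake, hdrop]
        have hi' : (t :: s').length - 1 - 1 = s'.length - 1 := by simp
        rw [hi', ih s']
      · rw [if_neg hc, if_neg hc]
        have hpath : (t :: s').reverse ++ x :: rest' = (x :: t :: s').reverse ++ rest' := by
          simp
        have hi' : (t :: s').length - 1 + 1 = (x :: t :: s').length - 1 := by simp
        rw [hpath, hi', ih (x :: t :: s')]

-- ===== VERDICT (by name: the statement is the Claim_ definition above) =====
theorem pullTight_spec : Claim_equal_pullTight := by
  intro path _
  unfold Spec_pullTight pullTight pullTight_alt
  have := pullTightLoop_eq_go path []
  simpa using this
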